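-- pv_equiv track=rewrite | github.com/balhaddad-sys/shifu-ocr | test_arc.py | apply_self_tile
-- ===== SOURCE A (Python) =====
-- from typing import List, Tuple, Optional, Dict, Set, Callable
--
-- Grid = List[List[int]]
--
-- def dims(g: Grid) -> Tuple[int, int]:
--     return len(g), len(g[0]) if g else 0
--
-- def make(rows: int, cols: int, fill: int = 0) -> Grid:
--     return [[fill] * cols for _ in range(rows)]
--
-- def apply_self_tile(inp: Grid, rule: Dict) -> Grid:
--     ir, ic = dims(inp)
--     empty = rule['empty']
--     out = make(ir * ir, ic * ic, empty)
--     for tile_r in range(ir):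
--         for tile_c in range(ic):
--             if inp[tile_r][tile_c] != empty:
--                 for dr in range(ir):
--                     for dc in range(ic):
--                         out[tile_r * ir + dr][tile_c * ic + dc] = inp[dr][dc]
--     return out
-- ===== SOURCE B (Python) =====
-- def apply_self_tile(inp, rule):
--     ir = len(inp)
--     ic = len(inp[0]) if inp else 0
--     empty = rule['empty']
--     return [[inp[r % ir][c % ic] if inp[r // ir][c // ic] != empty else empty
--              for c in range(ic * ic)]
--             for r in range(ir * ir)]
-- ===== Notes on version B (the rewrite author's own statement) =====
-- stated objective: simpler
-- what changed: A allocates an (ir*ir)x(ic*ic) grid of 'empty' and imperatively copies the input block-by-block into it (four nested loops with in-place writes); B builds the output directly in one pass over output cells with a double comprehension, computing each cell as inp[r%ir][c%ic] if inp[r//ir][c//ic] != empty else empty.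
import Mathlib
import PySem

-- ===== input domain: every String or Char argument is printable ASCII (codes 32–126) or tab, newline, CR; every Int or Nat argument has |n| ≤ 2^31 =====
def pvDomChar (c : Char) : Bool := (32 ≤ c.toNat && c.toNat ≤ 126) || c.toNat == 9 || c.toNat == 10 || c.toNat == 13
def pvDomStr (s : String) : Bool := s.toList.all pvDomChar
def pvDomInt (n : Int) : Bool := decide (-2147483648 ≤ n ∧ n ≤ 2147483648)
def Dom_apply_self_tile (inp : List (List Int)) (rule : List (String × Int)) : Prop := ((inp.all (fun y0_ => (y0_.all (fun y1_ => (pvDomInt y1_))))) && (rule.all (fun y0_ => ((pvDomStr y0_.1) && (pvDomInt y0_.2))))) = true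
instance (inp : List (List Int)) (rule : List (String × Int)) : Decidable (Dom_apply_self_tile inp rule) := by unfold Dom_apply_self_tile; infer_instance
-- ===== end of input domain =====

-- B replaces A's imperative block-copying into a preallocated grid by a single output-driven
-- map over all cells using div/mod indexing; objective: simpler (same asymptotic cost).

-- ===== PORT A =====
-- inp[r][c]: both indices are in range wherever A runs without an IndexError (see Pre_), so getD is exact there
def pvVal (inp : List (List Int)) (r c : Nat) : Int := (inp.getD r []).getD c 0

-- out[r][c] = v  (in-place write; indices always in range in A's use)
def pvSet2 (o : List (List Int)) (r c : Nat) (v : Int) : List (List Int) :=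
  o.modify r (fun row => row.set c v)

-- the two inner loops of A: copy inp into the block (tile_r, tile_c) of out
def pvTile (inp : List (List Int)) (ir ic tr tc : Nat) (o : List (List Int)) : List (List Int) :=
  (List.range ir).foldl (fun o dr =>
    (List.range ic).foldl (fun o dc =>
      pvSet2 o (tr * ir + dr) (tc * ic + dc) (pvVal inp dr dc)) o) o

def apply_self_tile (inp : List (List Int)) (rule : List (String × Int)) : List (List Int) :=
  let ir := inp.length
  let ic := (inp.headD []).length      -- dims: len(g[0]) if g else 0
  match List.lookup "empty" rule with
  | none => []                          -- KeyError: excluded by Pre_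
  | some empty =>
    (List.range ir).foldl (fun out tr =>
      (List.range ic).foldl (fun out tc =>
        if pvVal inp tr tc ≠ empty then pvTile inp ir ic tr tc out else out) out)
      ((List.range (ir * ir)).map (fun _ => List.replicate (ic * ic) empty))   -- make(ir*ir, ic*ic, empty)

-- ===== PORT B =====
def apply_self_tile_alt (inp : List (List Int)) (rule : List (String × Int)) : List (List Int) :=
  let ir := inp.length
  let ic := (inp.headD []).length
  match List.lookup "empty" rule with
  | none => []                          -- KeyError: excluded by Pre_
  | some empty =>
    (List.range (ir * ir)).map (fun r =>
      (List.range (ic * ic)).map (fun c =>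
        if pvVal inp (r / ir) (c / ic) ≠ empty then pvVal inp (r % ir) (c % ic) else empty))

-- ===== PRECONDITION & SPEC =====
-- Pre_ excludes exactly the inputs where A raises: KeyError when rule has no "empty" key, and
-- IndexError when some row of inp is shorter than the first row (ragged grid).
def Pre_apply_self_tile (inp : List (List Int)) (rule : List (String × Int)) : Prop :=
  (List.lookup "empty" rule).isSome ∧ ∀ row ∈ inp, (inp.headD []).length ≤ row.length
instance (inp : List (List Int)) (rule : List (String × Int)) : Decidable (Pre_apply_self_tile inp rule) := by unfold Pre_apply_self_tile; infer_instance

def pvWitness_apply_self_tile : List (List Int) × (List (String × Int)) := ([[1, 0], [0, 1]], [("empty", 0)])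

def Spec_apply_self_tile (inp : List (List Int)) (rule : List (String × Int)) (out : List (List Int)) : Prop := out = apply_self_tile_alt inp rule
instance (inp : List (List Int)) (rule : List (String × Int)) (out : List (List Int)) : Decidable (Spec_apply_self_tile inp rule out) := by unfold Spec_apply_self_tile; infer_instance

-- ===== CLAIM (what is proved, stated in full; the proofs are below) =====
def Claim_equal_apply_self_tile : Prop := ∀ (inp : List (List Int)) (rule : List (String × Int)), Dom_apply_self_tile inp rule → Pre_apply_self_tile inp rule → Spec_apply_self_tile inp rule (apply_self_tile inp rule)

-- ===== LEMMAS AND PROOFS =====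

-- a grid given cell-wise by f, as B builds it
def pvGridF (ir ic : Nat) (f : Nat → Nat → Int) : List (List Int) :=
  (List.range (ir * ir)).map (fun r => (List.range (ic * ic)).map (fun c => f r c))

-- the cell function "block (r/ir, c/ic) already processed (Q) shows the input, otherwise e"
def pvCell (val : Nat → Nat → Int) (e : Int) (ir ic : Nat) (Q : Nat → Nat → Bool) (r c : Nat) : Int :=
  if Q (r / ir) (c / ic) then val (r % ir) (c % ic) else e

lemma pvGridF_congr {ir ic : Nat} {f g : Nat → Nat → Int}
    (h : ∀ r c, r < ir * ir → c < ic * ic → f r c = g r c) :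
    pvGridF ir ic f = pvGridF ir ic g := by
  simp only [pvGridF]
  refine List.map_congr_left (fun r hr => ?_)
  refine List.map_congr_left (fun c hc => ?_)
  exact h r c (List.mem_range.mp hr) (List.mem_range.mp hc)

lemma pv_blk_lt {a b n : Nat} (ha : a < n) (hb : b < n) : a * n + b < n * n := by
  calc a * n + b < a * n + n := by omega
    _ = (a + 1) * n := by ring
    _ ≤ n * n := Nat.mul_le_mul_right n ha

lemma pv_div_eq_iff {n t r : Nat} (hn : 0 < n) : r / n = t ↔ t * n ≤ r ∧ r < t * n + n := by
  have hdm := Nat.div_add_mod r n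
  rw [Nat.mul_comm] at hdm
  have hm := Nat.mod_lt r hn
  constructor
  · rintro rfl
    omega
  · rintro ⟨h1, h2⟩
    have hle : t ≤ r / n := (Nat.le_div_iff_mul_le hn).mpr h1
    have hlt : r / n < t + 1 := (Nat.div_lt_iff_lt_mul hn).mpr
      (by calc r < t * n + n := h2
            _ = (t + 1) * n := by ring)
    omega

lemma pv_mod_eq {n t r : Nat} (h : r / n = t) : r % n = r - t * n := by
  have hdm := Nat.mod_add_div r n
  rw [h, Nat.mul_comm] at hdm
  omega

lemma set2_gridF {ir ic a b : Nat} (v : Int) (f : Nat → Nat → Int)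
    (_ : a < ir * ir) (_ : b < ic * ic) :
    pvSet2 (pvGridF ir ic f) a b v
      = pvGridF ir ic (fun r c => if r = a ∧ c = b then v else f r c) := by
  apply List.ext_getElem
  · simp [pvSet2, pvGridF]
  · intro i h1 h2
    simp only [pvSet2, pvGridF] at h1 h2 ⊢
    rw [List.getElem_modify]
    have hi : i < ir * ir := by simpa using h1
    by_cases hia : a = i
    · subst hia
      simp only [List.getElem_map, List.getElem_range, if_true, true_and]
      apply List.ext_getElem
      · simp
      · intro j j1 j2
        rw [List.getElem_set]
        simp only [List.getElem_map, List.getElem_range]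
        by_cases hjb : b = j <;> simp [hjb, eq_comm]
    · simp [hia, List.getElem_map, List.getElem_range, Ne.symm hia]

lemma cfold_gridF {ir ic R tc : Nat} (w : Nat → Int) (htc : tc < ic) (hR : R < ir * ir) :
    ∀ (M : List Nat) (f : Nat → Nat → Int), (∀ dc ∈ M, dc < ic) →
      M.foldl (fun o dc => pvSet2 o R (tc * ic + dc) (w dc)) (pvGridF ir ic f)
        = pvGridF ir ic (fun r c =>
            if r = R ∧ tc * ic ≤ c ∧ c < tc * ic + ic ∧ (c - tc * ic) ∈ M then w (c - tc * ic) else f r c) := by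
  intro M
  induction M with
  | nil =>
    intro f _
    simp only [List.foldl_nil]
    exact pvGridF_congr (fun r c _ _ => by simp)
  | cons x M ih =>
    intro f hM
    have hx : x < ic := hM x (by simp)
    have hxc : tc * ic + x < ic * ic := pv_blk_lt htc hx
    simp only [List.foldl_cons]
    rw [set2_gridF (w x) f hR hxc, ih _ (fun dc h => hM dc (by simp [h]))]
    refine pvGridF_congr (fun r c _ _ => ?_)
    by_cases hr : r = R
    · subst hr
      by_cases hcx : c = tc * ic + x
      · subst hcx
        have hmem : (tc * ic + x - tc * ic) ∈ x :: M := by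
          simp only [Nat.add_sub_cancel_left]; exact List.mem_cons_self
        by_cases hM' : (tc * ic + x - tc * ic) ∈ M <;> simp_all
      · by_cases hM' : (c - tc * ic) ∈ M
        · by_cases hb : tc * ic ≤ c ∧ c < tc * ic + ic
          · have : (c - tc * ic) ∈ x :: M := by simp [hM']
            simp_all
          · simp_all
        · have hnx : ¬ ((c - tc * ic) ∈ x :: M ∧ tc * ic ≤ c ∧ c < tc * ic + ic) := by
            rintro ⟨hmem, hb1, hb2⟩
            rcases List.mem_cons.mp hmem with h | h
            · exact hcx (by omega)
            · exact hM' h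
          by_cases hb : tc * ic ≤ c ∧ c < tc * ic + ic <;> simp_all
    · simp [hr]

lemma rfold_gridF {ir ic tr tc : Nat} (w : Nat → Nat → Int) (htr : tr < ir) (htc : tc < ic) :
    ∀ (D : List Nat) (f : Nat → Nat → Int), (∀ dr ∈ D, dr < ir) →
      D.foldl (fun o dr =>
          (List.range ic).foldl (fun o dc => pvSet2 o (tr * ir + dr) (tc * ic + dc) (w dr dc)) o)
        (pvGridF ir ic f)
        = pvGridF ir ic (fun r c =>
            if tr * ir ≤ r ∧ r < tr * ir + ir ∧ (r - tr * ir) ∈ D ∧ tc * ic ≤ c ∧ c < tc * ic + ic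
            then w (r - tr * ir) (c - tc * ic) else f r c) := by
  intro D
  induction D with
  | nil =>
    intro f _
    simp only [List.foldl_nil]
    exact pvGridF_congr (fun r c _ _ => by simp)
  | cons x D ih =>
    intro f hD
    have hx : x < ir := hD x (by simp)
    have hxr : tr * ir + x < ir * ir := pv_blk_lt htr hx
    simp only [List.foldl_cons]
    rw [cfold_gridF (w x) htc hxr (List.range ic) f (fun dc h => List.mem_range.mp h),
        ih _ (fun dr h => hD dr (by simp [h]))]
    refine pvGridF_congr (fun r c _ _ => ?_)
    by_cases hc : tc * ic ≤ c ∧ c < tc * ic + ic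
    · by_cases hrx : r = tr * ir + x
      · subst hrx
        have : (tr * ir + x - tr * ir) ∈ x :: D := by
          simp only [Nat.add_sub_cancel_left]; exact List.mem_cons_self
        by_cases hD' : (tr * ir + x - tr * ir) ∈ D <;> simp_all [List.mem_range] <;> omega
      · by_cases hD' : (r - tr * ir) ∈ D
        · by_cases hb : tr * ir ≤ r ∧ r < tr * ir + ir
          · have : (r - tr * ir) ∈ x :: D := by simp [hD']
            simp_all [List.mem_range]
          · simp_all [List.mem_range]
        · have hnx : ¬ (tr * ir ≤ r ∧ r < tr * ir + ir ∧ (r - tr * ir) ∈ x :: D) := by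
            rintro ⟨hb1, hb2, hmem⟩
            rcases List.mem_cons.mp hmem with h | h
            · exact hrx (by omega)
            · exact hD' h
          by_cases hb : tr * ir ≤ r ∧ r < tr * ir + ir <;> simp_all [List.mem_range]
    · simp [hc, List.mem_range]
      intro h1 h2 h3 h4
      omega

lemma pv_pos_of_lt_sq {n r : Nat} (h : r < n * n) : 0 < n := by
  rcases Nat.eq_zero_or_pos n with h0 | h0
  · subst h0; omega
  · exact h0

lemma tile_gridF (inp : List (List Int)) {ir ic tr tc : Nat} (e : Int) (Q : Nat → Nat → Bool)
    (htr : tr < ir) (htc : tc < ic) :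
    pvTile inp ir ic tr tc (pvGridF ir ic (pvCell (pvVal inp) e ir ic Q))
      = pvGridF ir ic (pvCell (pvVal inp) e ir ic (fun t u => Q t u || (t == tr && u == tc))) := by
  unfold pvTile
  rw [rfold_gridF (pvVal inp) htr htc (List.range ir) _ (fun dr h => List.mem_range.mp h)]
  refine pvGridF_congr (fun r c hr hc => ?_)
  have hir : 0 < ir := pv_pos_of_lt_sq hr
  have hic : 0 < ic := pv_pos_of_lt_sq hc
  have hrdiv := pv_div_eq_iff (t := tr) (r := r) hir
  have hcdiv := pv_div_eq_iff (t := tc) (r := c) hic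
  simp only [pvCell, List.mem_range, Bool.or_eq_true, Bool.and_eq_true, beq_iff_eq]
  by_cases hb : tr * ir ≤ r ∧ r < tr * ir + ir ∧ tc * ic ≤ c ∧ c < tc * ic + ic
  · have hrd : r / ir = tr := hrdiv.mpr ⟨hb.1, hb.2.1⟩
    have hcd : c / ic = tc := hcdiv.mpr ⟨hb.2.2.1, hb.2.2.2⟩
    have hrm := pv_mod_eq hrd
    have hcm := pv_mod_eq hcd
    rw [if_pos (by omega), if_pos (by simp [hrd, hcd])]
    rw [hrm, hcm]
  · have hne : ¬ (r / ir = tr ∧ c / ic = tc) := by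
      rintro ⟨h1, h2⟩
      exact hb ⟨(hrdiv.mp h1).1, (hrdiv.mp h1).2, (hcdiv.mp h2).1, (hcdiv.mp h2).2⟩
    rw [if_neg (by omega)]
    by_cases hq : Q (r / ir) (c / ic) <;> simp_all
lemma ofold_tc (inp : List (List Int)) {ir ic tr : Nat} (e : Int) (htr : tr < ir) :
    ∀ (M : List Nat) (Q : Nat → Nat → Bool), (∀ tc ∈ M, tc < ic) →
      M.foldl (fun o tc => if pvVal inp tr tc ≠ e then pvTile inp ir ic tr tc o else o)
        (pvGridF ir ic (pvCell (pvVal inp) e ir ic Q))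
        = pvGridF ir ic (pvCell (pvVal inp) e ir ic
            (fun t u => Q t u || (t == tr && decide (u ∈ M) && (pvVal inp tr u != e)))) := by
  intro M
  induction M with
  | nil =>
    intro Q _
    simp only [List.foldl_nil]
    refine pvGridF_congr (fun r c _ _ => ?_)
    simp [pvCell]
  | cons x M ih =>
    intro Q hM
    have hx : x < ic := hM x (by simp)
    simp only [List.foldl_cons]
    by_cases hcond : pvVal inp tr x ≠ e
    · rw [if_pos hcond, tile_gridF inp e Q htr hx,
          ih _ (fun tc h => hM tc (by simp [h]))]
      refine pvGridF_congr (fun r c _ _ => ?_)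
      simp only [pvCell]
      congr 1
      by_cases hu : c / ic = x
      · by_cases ht : r / ir = tr <;> simp_all
      · by_cases hm : c / ic ∈ M <;> simp_all
    · rw [if_neg hcond, ih _ (fun tc h => hM tc (by simp [h]))]
      refine pvGridF_congr (fun r c _ _ => ?_)
      simp only [pvCell]
      congr 1
      by_cases hu : c / ic = x
      · subst hu
        simp_all
      · simp [hu]

lemma ofold_tr (inp : List (List Int)) {ir ic : Nat} (e : Int) :
    ∀ (L : List Nat) (Q : Nat → Nat → Bool), (∀ tr ∈ L, tr < ir) →
      L.foldl (fun o tr =>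
          (List.range ic).foldl (fun o tc => if pvVal inp tr tc ≠ e then pvTile inp ir ic tr tc o else o) o)
        (pvGridF ir ic (pvCell (pvVal inp) e ir ic Q))
        = pvGridF ir ic (pvCell (pvVal inp) e ir ic
            (fun t u => Q t u || (decide (t ∈ L) && (pvVal inp t u != e)))) := by
  intro L
  induction L with
  | nil =>
    intro Q _
    simp only [List.foldl_nil]
    refine pvGridF_congr (fun r c _ _ => ?_)
    simp [pvCell]
  | cons x L ih =>
    intro Q hL
    have hx : x < ir := hL x (by simp)
    simp only [List.foldl_cons]
    rw [ofold_tc inp e hx (List.range ic) Q (fun tc h => List.mem_range.mp h),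
        ih _ (fun tr h => hL tr (by simp [h]))]
    refine pvGridF_congr (fun r c hr hc => ?_)
    have hic : 0 < ic := pv_pos_of_lt_sq hc
    have hcd : c / ic < ic := (Nat.div_lt_iff_lt_mul hic).mpr hc
    simp only [pvCell]
    congr 1
    by_cases ht : r / ir = x
    · simp_all
    · by_cases hm : r / ir ∈ L <;> simp_all

-- ===== VERDICT (by name: the statement is the Claim_ definition above) =====
theorem apply_self_tile_spec : Claim_equal_apply_self_tile := by
  intro inp rule _ hpre
  unfold Spec_apply_self_tile
  obtain ⟨hkey, _⟩ := hpre
  rcases hk : List.lookup "empty" rule with _ | e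
  · rw [hk] at hkey; simp at hkey
  · show apply_self_tile inp rule = apply_self_tile_alt inp rule
    unfold apply_self_tile apply_self_tile_alt
    rw [hk]
    dsimp only
    set ir := inp.length with hir
    set ic := (inp.headD []).length with hic
    have hinit : (List.range (ir * ir)).map (fun _ => List.replicate (ic * ic) e)
        = pvGridF ir ic (pvCell (pvVal inp) e ir ic (fun _ _ => false)) := by
      refine List.map_congr_left (fun r _ => ?_)
      apply List.ext_getElem
      · simp
      · intro i h1 h2
        simp [pvCell]
    rw [hinit, ofold_tr inp e (List.range ir) _ (fun tr h => List.mem_range.mp h)]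
    simp only [pvGridF]
    refine List.map_congr_left (fun r hr => ?_)
    refine List.map_congr_left (fun c hc => ?_)
    have hr' : r < ir * ir := List.mem_range.mp hr
    have hc' : c < ic * ic := List.mem_range.mp hc
    have hird : r / ir < ir := (Nat.div_lt_iff_lt_mul (pv_pos_of_lt_sq hr')).mpr hr'
    simp only [pvCell, Bool.false_or, List.mem_range]
    by_cases h : pvVal inp (r / ir) (c / ic) ≠ e <;> simp_all
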